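-- pv_equiv track=rewrite | github.com/sormo/algorithm | dynamic/longestIncreasingSubsequence.py | constructLISTree
-- ===== SOURCE A (Python) =====
-- def constructLISTree(arr):
-- 	# TODO can I return structure with named elements ???
-- 	tails = {}
-- 	heads = {}
--
-- 	# TODO do this in one line
-- 	for i in range(len(arr)):
-- 		tails[i] = []
-- 		heads[i] = []
--
-- 	for i in range(len(arr)):
-- 		for j in range(i + 1, len(arr)):
-- 			if arr[i] < arr[j]:
-- 				tails[i].append(j)
-- 				heads[j].append(i)
--
-- 	return (tails, heads)
-- ===== SOURCE B (Python) =====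
-- def constructLISTree(arr):
-- 	n = len(arr)
--
-- 	def build(k):
-- 		# recursive decomposition: edges among the suffix indices k..n-1
-- 		if k == n:
-- 			return {}, {}
-- 		t, h = build(k + 1)
-- 		x = arr[k]
-- 		tails = {k: [j for j in range(k + 1, n) if x < arr[j]]}
-- 		tails.update(t)
-- 		heads = {k: []}
-- 		for j, preds in h.items():
-- 			heads[j] = [k] + preds if x < arr[j] else preds
-- 		return tails, heads
--
-- 	return build(0)
-- ===== Notes on version B (the rewrite author's own statement) =====
-- stated objective: alternative
-- what changed: A's imperative nested loops mutating pre-initialized dicts are replaced by a recursion on the suffix of indices: build(k) returns the tails/heads dicts for indices k..n-1, computing index k's tails row as one comprehension and extending each recursively-built heads row by prepending k, with no mutation of previously built rows.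
import Mathlib
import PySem

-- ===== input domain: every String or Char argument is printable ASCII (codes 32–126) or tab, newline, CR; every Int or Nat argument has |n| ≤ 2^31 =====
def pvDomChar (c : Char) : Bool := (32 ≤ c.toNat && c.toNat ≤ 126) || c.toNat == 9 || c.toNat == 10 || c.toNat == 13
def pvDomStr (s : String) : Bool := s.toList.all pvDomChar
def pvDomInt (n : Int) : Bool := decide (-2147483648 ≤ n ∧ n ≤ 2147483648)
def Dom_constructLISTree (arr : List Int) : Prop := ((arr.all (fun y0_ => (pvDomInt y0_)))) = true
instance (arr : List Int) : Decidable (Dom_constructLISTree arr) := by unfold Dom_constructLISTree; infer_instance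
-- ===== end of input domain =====

-- B replaces A's imperative nested loops over pre-initialized mutable dicts by a recursion on the
-- suffix of indices: build(k) returns the edge dicts for indices k..n-1, computing the tails row of
-- k by one comprehension and extending the recursively built heads rows by prepending k
-- (objective: alternative decomposition, iterative ↔ recursive).

-- ===== PORT A =====
def constructLISTree (arr : List Int) : (List (Int × List Int)) × (List (Int × List Int)) :=
  let n : Int := arr.length
  -- for i in range(len(arr)): tails[i] = []; heads[i] = []
  let init :=
    (PySem.List.pyRange 0 n).foldl
      (fun (p : PySem.Dict Int (List Int) × PySem.Dict Int (List Int)) i =>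
        (p.1.insert i [], p.2.insert i [])) (PySem.Dict.empty, PySem.Dict.empty)
  -- for i: for j in range(i+1, len(arr)): if arr[i] < arr[j]: tails[i].append(j); heads[j].append(i)
  -- (arr[i]/arr[j] read via pyGetD: i, j are always in range 0 ≤ i < j < len(arr), so this is exact)
  let final :=
    (PySem.List.pyRange 0 n).foldl
      (fun p i =>
        (PySem.List.pyRange (i + 1) n).foldl
          (fun q j =>
            if PySem.List.pyGetD arr i 0 < PySem.List.pyGetD arr j 0 then
              (q.1.modify i [] (· ++ [j]), q.2.modify j [] (· ++ [i]))
            else q) p) init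
  (final.1.items, final.2.items)

-- ===== PORT B =====
-- def build(k): recursion on the suffix k..n-1.  Python tests 'k == n'; build is only ever called
-- with 0 ≤ k ≤ n, where 'n ≤ k' is the same test (and makes termination structural on n - k).
def constructLISTree_altBuild (arr : List Int) (k : Nat) :
    PySem.Dict Int (List Int) × PySem.Dict Int (List Int) :=
  if arr.length ≤ k then (PySem.Dict.empty, PySem.Dict.empty)
  else
    -- t, h = build(k + 1)
    let th := constructLISTree_altBuild arr (k + 1)
    -- x = arr[k]  (0 ≤ k < n here, so pyGetD is exact)
    let x := PySem.List.pyGetD arr (k : Int) 0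
    -- tails = {k: [j for j in range(k+1, n) if x < arr[j]]}; tails.update(t)
    let tails :=
      (PySem.Dict.empty.insert (k : Int)
          ((PySem.List.pyRange ((k : Int) + 1) (arr.length : Int)).filter
            (fun j => decide (x < PySem.List.pyGetD arr j 0)))).update th.1.items
    -- heads = {k: []}; for j, preds in h.items(): heads[j] = [k] + preds if x < arr[j] else preds
    let heads :=
      th.2.items.foldl
        (fun d p =>
          d.insert p.1 (if x < PySem.List.pyGetD arr p.1 0 then (k : Int) :: p.2 else p.2))
        (PySem.Dict.empty.insert (k : Int) ([] : List Int))
    (tails, heads)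
termination_by arr.length - k

def constructLISTree_alt (arr : List Int) : (List (Int × List Int)) × (List (Int × List Int)) :=
  let th := constructLISTree_altBuild arr 0
  (th.1.items, th.2.items)

-- ===== PRECONDITION & SPEC =====
def Spec_constructLISTree (arr : List Int) (out : (List (Int × List Int)) × (List (Int × List Int))) : Prop := out = constructLISTree_alt arr
instance (arr : List Int) (out : (List (Int × List Int)) × (List (Int × List Int))) : Decidable (Spec_constructLISTree arr out) := by unfold Spec_constructLISTree; infer_instance

-- ===== CLAIM (what is proved, stated in full; the proofs are below) =====
def Claim_equal_constructLISTree : Prop := ∀ (arr : List Int), Dom_constructLISTree arr → Spec_constructLISTree arr (constructLISTree arr)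

-- ===== LEMMAS AND PROOFS =====

-- the common closed form both programs compute, row by row
def pvRowT (arr : List Int) (i : Int) : List Int :=
  (PySem.List.pyRange (i + 1) (arr.length : Int)).filter
    (fun j => decide (PySem.List.pyGetD arr i 0 < PySem.List.pyGetD arr j 0))

def pvRowH (arr : List Int) (k j : Int) : List Int :=
  (PySem.List.pyRange k j).filter
    (fun i => decide (PySem.List.pyGetD arr i 0 < PySem.List.pyGetD arr j 0))

-- ---------- B side: the recursion returns exactly the closed-form rows for the suffix ----------
theorem pv_build_items (arr : List Int) (k : Nat) :
    (constructLISTree_altBuild arr k).1.items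
      = (PySem.List.pyRange (k : Int) (arr.length : Int)).map (fun i => (i, pvRowT arr i))
    ∧ (constructLISTree_altBuild arr k).2.items
      = (PySem.List.pyRange (k : Int) (arr.length : Int)).map (fun j => (j, pvRowH arr (k : Int) j)) := by
  unfold constructLISTree_altBuild
  by_cases h : arr.length ≤ k
  · rw [if_pos h, PySem.List.pyRange_one_eq_nil (by exact_mod_cast h)]
    exact ⟨rfl, rfl⟩
  · rw [if_neg h]
    have IH := pv_build_items arr (k + 1)
    push_cast at IH
    have hk : (k : Int) < (arr.length : Int) := by exact_mod_cast Nat.lt_of_not_le h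
    have hcons := PySem.List.pyRange_one_cons hk
    have hmemgt : ∀ p ∈ (constructLISTree_altBuild arr (k + 1)).1.items, (k : Int) < p.1 := by
      intro p hp
      have : p.1 ∈ ((PySem.List.pyRange ((k : Int) + 1) (arr.length : Int)).map
          (fun i => (i, pvRowT arr i))).map Prod.fst := by
        rw [← IH.1]; exact List.mem_map_of_mem hp
      simp only [List.map_map] at this
      rcases List.mem_map.mp this with ⟨i, hi, hieq⟩
      have := (PySem.List.mem_pyRange_one.mp hi).1
      simp only [Function.comp] at hieq
      omega
    have hmemgt2 : ∀ p ∈ (constructLISTree_altBuild arr (k + 1)).2.items, (k : Int) < p.1 := by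
      intro p hp
      have : p.1 ∈ ((PySem.List.pyRange ((k : Int) + 1) (arr.length : Int)).map
          (fun j => (j, pvRowH arr ((k : Int) + 1) j))).map Prod.fst := by
        rw [← IH.2]; exact List.mem_map_of_mem hp
      simp only [List.map_map] at this
      rcases List.mem_map.mp this with ⟨i, hi, hieq⟩
      have := (PySem.List.mem_pyRange_one.mp hi).1
      simp only [Function.comp] at hieq
      omega
    constructor
    · -- tails
      show (PySem.Dict.update _ _).items = _
      rw [PySem.Dict.update]
      rw [PySem.Dict.items_foldl_insert_fresh
            (k := Prod.fst) (v := Prod.snd) _ _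
            (by
              intro p hp
              rw [PySem.Dict.contains_insert]
              simp only [PySem.Dict.contains_empty, Bool.or_false]
              have := hmemgt p hp
              simp only [beq_eq_false_iff_ne, ne_eq]
              omega)
            (by
              rw [IH.1, List.map_map]
              have : (Prod.fst ∘ fun i => (i, pvRowT arr i)) = (fun i : Int => i) := by
                funext i; rfl
              rw [this]
              simpa using PySem.List.nodup_pyRange_one ((k : Int) + 1) (arr.length : Int))]
      rw [PySem.Dict.items_insert_of_not_contains _ _ (PySem.Dict.contains_empty _)]
      rw [IH.1, hcons]
      simp [pvRowT, Function.comp_def,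
        show (PySem.Dict.empty : PySem.Dict Int (List Int)).items = [] from rfl]
    · -- heads
      rw [PySem.Dict.items_foldl_insert_fresh
            (k := Prod.fst)
            (v := fun p => if PySem.List.pyGetD arr (k : Int) 0 < PySem.List.pyGetD arr p.1 0
                    then (k : Int) :: p.2 else p.2) _ _
            (by
              intro p hp
              rw [PySem.Dict.contains_insert]
              simp only [PySem.Dict.contains_empty, Bool.or_false]
              have := hmemgt2 p hp
              simp only [beq_eq_false_iff_ne, ne_eq]
              omega)
            (by
              rw [IH.2, List.map_map]
              have : (Prod.fst ∘ fun j => (j, pvRowH arr ((k : Int) + 1) j)) = (fun j : Int => j) := by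
                funext j; rfl
              rw [this]
              simpa using PySem.List.nodup_pyRange_one ((k : Int) + 1) (arr.length : Int))]
      rw [PySem.Dict.items_insert_of_not_contains _ _ (PySem.Dict.contains_empty _)]
      rw [IH.2, hcons, List.map_map, List.map_cons]
      simp only [show (PySem.Dict.empty : PySem.Dict Int (List Int)).items = [] from rfl,
        List.nil_append]
      have hrow0 : pvRowH arr (k : Int) (k : Int) = ([] : List Int) := by
        simp [pvRowH, PySem.List.pyRange_one_eq_nil (le_refl (k : Int))]
      rw [hrow0]
      refine congrArg (List.cons _) ?_
      refine List.map_congr_left ?_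
      intro j hj
      have hjk : (k : Int) < j := by
        have := (PySem.List.mem_pyRange_one.mp hj).1; omega
      simp only [Function.comp_def]
      unfold pvRowH
      rw [PySem.List.pyRange_one_cons hjk, List.filter_cons]
      by_cases hx : PySem.List.pyGetD arr (k : Int) 0 < PySem.List.pyGetD arr j 0
      · simp only [hx, if_pos, decide_true]
      · simp only [hx, if_neg, not_false_iff, decide_false, Bool.false_eq_true]
termination_by arr.length - k

-- ---------- A side ----------
-- keys of a dict are preserved through any fold whose step preserves them
theorem pv_keys_foldl_inv {β : Type} (l : List β)
    (F : PySem.Dict Int (List Int) → β → PySem.Dict Int (List Int))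
    (R : List Int) (h : ∀ d x, x ∈ l → d.keys = R → (F d x).keys = R)
    (d : PySem.Dict Int (List Int)) (hd : d.keys = R) : (l.foldl F d).keys = R := by
  induction l generalizing d with
  | nil => exact hd
  | cons a l ih =>
    exact ih (fun d x hx => h d x (List.mem_cons_of_mem _ hx)) _ (h d a List.mem_cons_self hd)

-- a modify at an existing key keeps the key list
theorem pv_keys_modify_mem (d : PySem.Dict Int (List Int)) (k : Int) (f : List Int → List Int)
    (hk : k ∈ d.keys) : (d.modify k [] f).keys = d.keys := by
  rw [PySem.Dict.keys_modify, PySem.Dict.keys_insert_of_contains]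
  exact (PySem.Dict.contains_iff_mem_keys _ _).mpr hk

-- inner tails loop at row i: key i gets the filtered j's appended, every other key unchanged
theorem pv_inner_getD (arr : List Int) (i : Int) (js : List Int)
    (d : PySem.Dict Int (List Int)) (c : Int) :
    (js.foldl (fun d j =>
        if PySem.List.pyGetD arr i 0 < PySem.List.pyGetD arr j 0 then
          d.modify i [] (· ++ [j]) else d) d).getD c []
    = if c = i then
        d.getD c [] ++ js.filter (fun j => decide (PySem.List.pyGetD arr i 0 < PySem.List.pyGetD arr j 0))
      else d.getD c [] := by
  induction js generalizing d with
  | nil => simp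
  | cons j js ih =>
    simp only [List.foldl_cons, List.filter_cons]
    by_cases h : PySem.List.pyGetD arr i 0 < PySem.List.pyGetD arr j 0
    · simp only [h, if_pos, decide_true]
      rw [ih, PySem.Dict.getD_modify]
      by_cases hc : c = i
      · subst hc; simp
      · simp [hc]
    · simp only [h, if_neg, not_false_iff, decide_false]
      rw [ih]
      by_cases hc : c = i <;> simp [hc]

-- outer tails loop: key c accumulates exactly its own row (visited once)
theorem pv_tails_outer_getD (arr : List Int) (n : Int) (I : List Int)
    (d : PySem.Dict Int (List Int)) (c : Int) (hnd : I.Nodup) :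
    (I.foldl (fun d i =>
        (PySem.List.pyRange (i + 1) n).foldl
          (fun d j =>
            if PySem.List.pyGetD arr i 0 < PySem.List.pyGetD arr j 0 then
              d.modify i [] (· ++ [j]) else d) d) d).getD c []
    = if c ∈ I then
        d.getD c [] ++ (PySem.List.pyRange (c + 1) n).filter
          (fun j => decide (PySem.List.pyGetD arr c 0 < PySem.List.pyGetD arr j 0))
      else d.getD c [] := by
  induction I generalizing d with
  | nil => simp
  | cons a I ih =>
    simp only [List.nodup_cons] at hnd
    simp only [List.foldl_cons]
    rw [ih _ hnd.2, pv_inner_getD]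
    by_cases hca : c = a
    · subst hca
      simp [hnd.1]
    · by_cases hcI : c ∈ I <;> simp [hca, hcI]

-- inner heads loop at row i: key c gains [i] iff c is among the visited j's and the comparison holds
theorem pv_heads_inner_getD (arr : List Int) (i : Int) (js : List Int) (hnd : js.Nodup)
    (d : PySem.Dict Int (List Int)) (c : Int) :
    (js.foldl (fun d j =>
        if PySem.List.pyGetD arr i 0 < PySem.List.pyGetD arr j 0 then
          d.modify j [] (· ++ [i]) else d) d).getD c []
    = d.getD c [] ++
        (if c ∈ js ∧ PySem.List.pyGetD arr i 0 < PySem.List.pyGetD arr c 0 then [i] else []) := by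
  induction js generalizing d with
  | nil => simp
  | cons a js ih =>
    simp only [List.nodup_cons] at hnd
    simp only [List.foldl_cons]
    rw [ih hnd.2]
    by_cases hca : c = a
    · subst hca
      by_cases h : PySem.List.pyGetD arr i 0 < PySem.List.pyGetD arr c 0
      · rw [if_pos h, PySem.Dict.getD_modify, if_pos rfl]
        simp [hnd.1, h]
      · rw [if_neg h]
        simp [hnd.1, h]
    · have step : (if PySem.List.pyGetD arr i 0 < PySem.List.pyGetD arr a 0 then
            d.modify a [] (· ++ [i]) else d).getD c [] = d.getD c [] := by
        split
        · rw [PySem.Dict.getD_modify, if_neg hca]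
        · rfl
      rw [step]
      simp [hca]

-- outer heads loop: key c accumulates the qualifying i's in visit order
theorem pv_heads_outer_getD (arr : List Int) (n : Int) (I : List Int)
    (d : PySem.Dict Int (List Int)) (c : Int) :
    (I.foldl (fun d i =>
        (PySem.List.pyRange (i + 1) n).foldl
          (fun d j =>
            if PySem.List.pyGetD arr i 0 < PySem.List.pyGetD arr j 0 then
              d.modify j [] (· ++ [i]) else d) d) d).getD c []
    = d.getD c [] ++ I.filter (fun i =>
        decide (c ∈ PySem.List.pyRange (i + 1) n ∧
          PySem.List.pyGetD arr i 0 < PySem.List.pyGetD arr c 0)) := by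
  induction I generalizing d with
  | nil => simp
  | cons a I ih =>
    simp only [List.foldl_cons, List.filter_cons]
    rw [ih, pv_heads_inner_getD arr a _ (PySem.List.nodup_pyRange_one _ _), List.append_assoc]
    congr 1
    by_cases h : c ∈ PySem.List.pyRange (a + 1) n ∧
        PySem.List.pyGetD arr a 0 < PySem.List.pyGetD arr c 0
    · rw [if_pos h, if_pos (by simpa using h)]
      rfl
    · rw [if_neg h, if_neg (by simpa using h), List.nil_append]

-- the init fold produces items (i, []) for i over the range, componentwise
theorem pv_init_items (n : Int) :
    ((PySem.List.pyRange 0 n).foldl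
        (fun (d : PySem.Dict Int (List Int)) i => d.insert i []) PySem.Dict.empty).items
      = (PySem.List.pyRange 0 n).map (fun i => (i, ([] : List Int))) := by
  rw [show (fun (d : PySem.Dict Int (List Int)) i => d.insert i [])
        = (fun (d : PySem.Dict Int (List Int)) i => d.insert ((fun x : Int => x) i)
            ((fun _ : Int => ([] : List Int)) i)) from rfl]
  rw [PySem.Dict.items_foldl_insert_fresh _ _ _ _
        (fun a _ => PySem.Dict.contains_empty _)
        (by simpa using PySem.List.nodup_pyRange_one 0 n)]
  rfl

-- membership/order helper: filtering 'i < c ∧ P i' over range 0 n is filtering P over range 0 c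
theorem pv_filter_range_lt (n c : Int) (P : Int → Bool) (h0 : 0 ≤ c) (hcn : c < n) :
    (PySem.List.pyRange 0 n).filter (fun i =>
        decide (c ∈ PySem.List.pyRange (i + 1) n) && P i)
      = (PySem.List.pyRange 0 c).filter P := by
  rw [PySem.List.pyRange_one_append 0 c n h0 (le_of_lt hcn), List.filter_append]
  have h1 : (PySem.List.pyRange 0 c).filter (fun i =>
      decide (c ∈ PySem.List.pyRange (i + 1) n) && P i) = (PySem.List.pyRange 0 c).filter P := by
    apply List.filter_congr
    intro i hi
    have := PySem.List.mem_pyRange_one.mp hi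
    have : c ∈ PySem.List.pyRange (i + 1) n := PySem.List.mem_pyRange_one.mpr (by omega)
    simp [this]
  have h2 : (PySem.List.pyRange c n).filter (fun i =>
      decide (c ∈ PySem.List.pyRange (i + 1) n) && P i) = [] := by
    apply List.filter_eq_nil_iff.mpr
    intro i hi
    have hi' := PySem.List.mem_pyRange_one.mp hi
    have : c ∉ PySem.List.pyRange (i + 1) n := by
      intro hc
      have := PySem.List.mem_pyRange_one.mp hc
      omega
    simp [this]
  rw [h1, h2, List.append_nil]


-- the initial dict: every lookup is [] (its rows start empty)
theorem pv_init_getD (arr : List Int) (c : Int) :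
    (((PySem.List.pyRange 0 (arr.length : Int)).foldl
        (fun (d : PySem.Dict Int (List Int)) i => d.insert i []) PySem.Dict.empty)).getD c []
      = [] := by
  by_cases hc : c ∈ PySem.List.pyRange 0 (arr.length : Int)
  · have hnd : (((PySem.List.pyRange 0 (arr.length : Int)).foldl
        (fun (d : PySem.Dict Int (List Int)) i => d.insert i []) PySem.Dict.empty)).keys.Nodup := by
      simp only [PySem.Dict.keys, pv_init_items, List.map_map]
      simpa [Function.comp_def] using PySem.List.nodup_pyRange_one 0 (arr.length : Int)
    have hm : (c, ([] : List Int)) ∈ (((PySem.List.pyRange 0 (arr.length : Int)).foldl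
        (fun (d : PySem.Dict Int (List Int)) i => d.insert i []) PySem.Dict.empty)).items := by
      rw [pv_init_items]
      exact List.mem_map_of_mem hc
    exact PySem.Dict.getD_of_mem_items _ hm hnd []
  · refine PySem.Dict.getD_of_not_contains _ _ ?_
    rw [PySem.Dict.contains_eq_decide_mem_keys]
    simp only [PySem.Dict.keys, pv_init_items, List.map_map, decide_eq_false_iff_not]
    intro hmem
    rcases List.mem_map.mp hmem with ⟨i, hi, hieq⟩
    simp only [Function.comp] at hieq
    exact hc (hieq ▸ hi)

theorem pv_init_keys (arr : List Int) :
    (((PySem.List.pyRange 0 (arr.length : Int)).foldl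
        (fun (d : PySem.Dict Int (List Int)) i => d.insert i []) PySem.Dict.empty)).keys
      = PySem.List.pyRange 0 (arr.length : Int) := by
  simp only [PySem.Dict.keys, pv_init_items, List.map_map]
  simp [Function.comp_def]

-- A's tails dict (after its nested loop) lists exactly the closed-form rows
theorem pv_A_tails_items (arr : List Int) :
    ((PySem.List.pyRange 0 (arr.length : Int)).foldl
      (fun d i =>
        (PySem.List.pyRange (i + 1) (arr.length : Int)).foldl
          (fun d j =>
            if PySem.List.pyGetD arr i 0 < PySem.List.pyGetD arr j 0 then
              d.modify i [] (· ++ [j]) else d) d)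
      ((PySem.List.pyRange 0 (arr.length : Int)).foldl
        (fun (d : PySem.Dict Int (List Int)) i => d.insert i []) PySem.Dict.empty)).items
    = (PySem.List.pyRange 0 (arr.length : Int)).map (fun i => (i, pvRowT arr i)) := by
  have hkeysT : ((PySem.List.pyRange 0 (arr.length : Int)).foldl
      (fun d i =>
        (PySem.List.pyRange (i + 1) (arr.length : Int)).foldl
          (fun d j =>
            if PySem.List.pyGetD arr i 0 < PySem.List.pyGetD arr j 0 then
              d.modify i [] (· ++ [j]) else d) d)
      ((PySem.List.pyRange 0 (arr.length : Int)).foldl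
        (fun (d : PySem.Dict Int (List Int)) i => d.insert i []) PySem.Dict.empty)).keys
      = PySem.List.pyRange 0 (arr.length : Int) := by
    apply pv_keys_foldl_inv _ _ _ ?_ _ (pv_init_keys arr)
    intro d i hi hd
    apply pv_keys_foldl_inv _ _ _ ?_ _ hd
    intro d' j hj hd'
    split
    · exact (pv_keys_modify_mem d' i _ (hd' ▸ hi)).trans hd'
    · exact hd'
  rw [PySem.Dict.items_eq_map_keys _
      (by rw [hkeysT]; exact PySem.List.nodup_pyRange_one _ _) []]
  rw [hkeysT]
  apply List.map_congr_left
  intro c hc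
  rw [pv_tails_outer_getD arr _ _ _ _ (PySem.List.nodup_pyRange_one _ _), if_pos hc,
      pv_init_getD arr c]
  rfl

-- A's heads dict (after its nested loop) lists exactly the closed-form rows
theorem pv_A_heads_items (arr : List Int) :
    ((PySem.List.pyRange 0 (arr.length : Int)).foldl
      (fun d i =>
        (PySem.List.pyRange (i + 1) (arr.length : Int)).foldl
          (fun d j =>
            if PySem.List.pyGetD arr i 0 < PySem.List.pyGetD arr j 0 then
              d.modify j [] (· ++ [i]) else d) d)
      ((PySem.List.pyRange 0 (arr.length : Int)).foldl
        (fun (d : PySem.Dict Int (List Int)) i => d.insert i []) PySem.Dict.empty)).items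
    = (PySem.List.pyRange 0 (arr.length : Int)).map (fun j => (j, pvRowH arr 0 j)) := by
  have hkeysH : ((PySem.List.pyRange 0 (arr.length : Int)).foldl
      (fun d i =>
        (PySem.List.pyRange (i + 1) (arr.length : Int)).foldl
          (fun d j =>
            if PySem.List.pyGetD arr i 0 < PySem.List.pyGetD arr j 0 then
              d.modify j [] (· ++ [i]) else d) d)
      ((PySem.List.pyRange 0 (arr.length : Int)).foldl
        (fun (d : PySem.Dict Int (List Int)) i => d.insert i []) PySem.Dict.empty)).keys
      = PySem.List.pyRange 0 (arr.length : Int) := by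
    apply pv_keys_foldl_inv _ _ _ ?_ _ (pv_init_keys arr)
    intro d i hi hd
    apply pv_keys_foldl_inv _ _ _ ?_ _ hd
    intro d' j hj hd'
    split
    · refine (pv_keys_modify_mem d' j _ ?_).trans hd'
      rw [hd']
      have hi' := PySem.List.mem_pyRange_one.mp hi
      have hj' := PySem.List.mem_pyRange_one.mp hj
      exact PySem.List.mem_pyRange_one.mpr (by omega)
    · exact hd'
  rw [PySem.Dict.items_eq_map_keys _
      (by rw [hkeysH]; exact PySem.List.nodup_pyRange_one _ _) []]
  rw [hkeysH]
  apply List.map_congr_left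
  intro c hc
  rw [pv_heads_outer_getD, pv_init_getD arr c, List.nil_append]
  have hc' := PySem.List.mem_pyRange_one.mp hc
  have hsplit : (fun i => decide (c ∈ PySem.List.pyRange (i + 1) (arr.length : Int) ∧
      PySem.List.pyGetD arr i 0 < PySem.List.pyGetD arr c 0))
      = (fun i => decide (c ∈ PySem.List.pyRange (i + 1) (arr.length : Int)) &&
          decide (PySem.List.pyGetD arr i 0 < PySem.List.pyGetD arr c 0)) := by
    funext i; simp
  rw [hsplit, pv_filter_range_lt _ c _ hc'.1 hc'.2]
  rfl

-- ===== VERDICT (by name: the statement is the Claim_ definition above) =====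
theorem constructLISTree_spec : Claim_equal_constructLISTree := by
  intro arr _
  unfold Spec_constructLISTree constructLISTree constructLISTree_alt
  simp only []
  -- split A's paired initialization fold
  rw [PySem.List.foldl_prod_mk (fun (d : PySem.Dict Int (List Int)) i => d.insert i [])
        (fun (d : PySem.Dict Int (List Int)) i => d.insert i [])
        (PySem.List.pyRange 0 (arr.length : Int)) PySem.Dict.empty PySem.Dict.empty]
  -- turn A's fused loop body into a componentwise product step
  rw [show (fun (p : PySem.Dict Int (List Int) × PySem.Dict Int (List Int)) i =>
        (PySem.List.pyRange (i + 1) (arr.length : Int)).foldl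
          (fun q j =>
            if PySem.List.pyGetD arr i 0 < PySem.List.pyGetD arr j 0 then
              (q.1.modify i [] (· ++ [j]), q.2.modify j [] (· ++ [i]))
            else q) p)
      = (fun (p : PySem.Dict Int (List Int) × PySem.Dict Int (List Int)) i =>
          ((PySem.List.pyRange (i + 1) (arr.length : Int)).foldl
            (fun d j =>
              if PySem.List.pyGetD arr i 0 < PySem.List.pyGetD arr j 0 then
                d.modify i [] (· ++ [j]) else d) p.1,
           (PySem.List.pyRange (i + 1) (arr.length : Int)).foldl
            (fun h j =>
              if PySem.List.pyGetD arr i 0 < PySem.List.pyGetD arr j 0 then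
                h.modify j [] (· ++ [i]) else h) p.2)) from by
    funext p i
    rw [show (fun (q : PySem.Dict Int (List Int) × PySem.Dict Int (List Int)) j =>
          if PySem.List.pyGetD arr i 0 < PySem.List.pyGetD arr j 0 then
            (q.1.modify i [] (· ++ [j]), q.2.modify j [] (· ++ [i]))
          else q)
        = (fun (q : PySem.Dict Int (List Int) × PySem.Dict Int (List Int)) j =>
            ((if PySem.List.pyGetD arr i 0 < PySem.List.pyGetD arr j 0 then
                q.1.modify i [] (· ++ [j]) else q.1),
             (if PySem.List.pyGetD arr i 0 < PySem.List.pyGetD arr j 0 then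
                q.2.modify j [] (· ++ [i]) else q.2))) from by
      funext q j; split <;> rfl]
    exact PySem.List.foldl_prod_mk
      (fun (d : PySem.Dict Int (List Int)) j =>
        if PySem.List.pyGetD arr i 0 < PySem.List.pyGetD arr j 0 then
          d.modify i [] (· ++ [j]) else d)
      (fun (h : PySem.Dict Int (List Int)) j =>
        if PySem.List.pyGetD arr i 0 < PySem.List.pyGetD arr j 0 then
          h.modify j [] (· ++ [i]) else h)
      (PySem.List.pyRange (i + 1) (arr.length : Int)) p.1 p.2]
  -- split the now-componentwise fused loop into the tails fold and the heads fold
  rw [PySem.List.foldl_prod_mk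
        (fun (d : PySem.Dict Int (List Int)) i =>
          (PySem.List.pyRange (i + 1) (arr.length : Int)).foldl
            (fun d j =>
              if PySem.List.pyGetD arr i 0 < PySem.List.pyGetD arr j 0 then
                d.modify i [] (· ++ [j]) else d) d)
        (fun (h : PySem.Dict Int (List Int)) i =>
          (PySem.List.pyRange (i + 1) (arr.length : Int)).foldl
            (fun h j =>
              if PySem.List.pyGetD arr i 0 < PySem.List.pyGetD arr j 0 then
                h.modify j [] (· ++ [i]) else h) h)
        (PySem.List.pyRange 0 (arr.length : Int)) _ _]
  exact Prod.ext ((pv_A_tails_items arr).trans ((pv_build_items arr 0).1).symm)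
    ((pv_A_heads_items arr).trans ((pv_build_items arr 0).2).symm)
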